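-- pv_equiv track=rewrite | github.com/przona/notebooks | przona.py | get_categories_per_recommendation
-- ===== SOURCE A (Python) =====
-- def get_categories_per_recommendation(recommendations_per_category):
--     categories_per_recommendation = {}
--     for category in recommendations_per_category:
--         for recommendation in recommendations_per_category[category]:
--             if recommendation not in categories_per_recommendation:
--                 categories_per_recommendation[recommendation] = {}
--                 for c in recommendations_per_category:
--                     categories_per_recommendation[recommendation][c] = " "
--             categories_per_recommendation[recommendation][category] = "+"
--     categories_per_recommendation = {r:categories_per_recommendation[r] for r in sorted(categories_per_recommendation.keys(),\
--         key=lambda r:len([c for c in categories_per_recommendation[r] if categories_per_recommendation[r][c] == "+"]),reverse=True)}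
--     return(categories_per_recommendation)
-- ===== SOURCE B (Python) =====
-- def get_categories_per_recommendation(recommendations_per_category):
--     # Indexless: no inverted dict is built; every fact is recomputed by
--     # membership tests directly against the input mapping.
--     order = []
--     for recs in recommendations_per_category.values():
--         for r in recs:
--             if r not in order:
--                 order.append(r)
--     order.sort(key=lambda r: sum(r in recs for recs in recommendations_per_category.values()),
--                reverse=True)
--     return {r: {c: ("+" if r in recs else " ")
--                 for c, recs in recommendations_per_category.items()}
--             for r in order}
-- ===== Notes on version B (the rewrite author's own statement) =====
-- stated objective: alternative
-- what changed: B builds no inverted index at all: it collects the first-seen recommendation order with a list membership check, sorts it by counting via direct 'r in recs' membership tests over the input mapping, and emits each grid row by re-testing membership per category, whereas A incrementally builds and mutates a dict of prefilled row dicts and re-scans them for '+' cells at sort time.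
import Mathlib
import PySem

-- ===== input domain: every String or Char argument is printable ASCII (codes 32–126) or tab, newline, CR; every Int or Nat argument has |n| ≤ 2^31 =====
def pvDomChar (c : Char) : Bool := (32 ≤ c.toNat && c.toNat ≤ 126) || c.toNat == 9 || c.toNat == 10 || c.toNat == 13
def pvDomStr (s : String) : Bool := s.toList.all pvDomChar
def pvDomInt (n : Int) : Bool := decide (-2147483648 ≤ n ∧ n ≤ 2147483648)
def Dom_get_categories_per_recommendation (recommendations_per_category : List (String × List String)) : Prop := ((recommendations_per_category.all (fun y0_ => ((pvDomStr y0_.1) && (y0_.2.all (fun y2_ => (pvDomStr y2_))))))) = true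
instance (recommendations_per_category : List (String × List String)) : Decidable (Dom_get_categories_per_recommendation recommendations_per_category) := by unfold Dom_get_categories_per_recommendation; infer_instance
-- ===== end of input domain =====

-- B is indexless: it builds no inverted dict at all, deriving the first-seen order, the sort
-- key and every grid cell by direct membership tests against the input; objective: alternative.

-- ===== PORT A =====
def get_categories_per_recommendation (recommendations_per_category : List (String × List String)) : List (String × List (String × String)) :=
  let cpr : PySem.Dict String (PySem.Dict String String) :=
    recommendations_per_category.foldl (fun cpr category =>
      category.2.foldl (fun cpr recommendation =>
        let cpr :=
          if cpr.contains recommendation then cpr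
          else cpr.insert recommendation
            (recommendations_per_category.foldl (fun row c => row.insert c.1 " ") PySem.Dict.empty)
        cpr.modify recommendation PySem.Dict.empty (fun row => row.insert category.1 "+")
      ) cpr
    ) PySem.Dict.empty
  let sortedKeys := PySem.List.sorted cpr.keys
    (fun r => ((cpr.getD r PySem.Dict.empty).keys.filter
      (fun c => (cpr.getD r PySem.Dict.empty).getD c "" == "+")).length) true
  sortedKeys.map (fun r => (r, (cpr.getD r PySem.Dict.empty).items))

-- ===== PORT B =====
def get_categories_per_recommendation_alt (recommendations_per_category : List (String × List String)) : List (String × List (String × String)) :=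
  let order : List String :=
    recommendations_per_category.foldl (fun order category =>
      category.2.foldl (fun order r =>
        if order.contains r then order else order ++ [r]) order) []
  let sortedOrder := PySem.List.sorted order
    (fun r => recommendations_per_category.countP (fun c => c.2.contains r)) true
  sortedOrder.map (fun r => (r, recommendations_per_category.map (fun c =>
    (c.1, if c.2.contains r then "+" else " "))))

-- ===== PRECONDITION & SPEC =====
-- Pre_ excludes association lists with duplicate category keys: A's parameter is a Python dict, which
-- cannot carry duplicate keys, so such lists do not encode any input A is actually called on.
def Pre_get_categories_per_recommendation (recommendations_per_category : List (String × List String)) : Prop :=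
  (recommendations_per_category.map Prod.fst).Nodup
instance (recommendations_per_category : List (String × List String)) : Decidable (Pre_get_categories_per_recommendation recommendations_per_category) := by unfold Pre_get_categories_per_recommendation; infer_instance
def pvWitness_get_categories_per_recommendation : (List (String × List String)) :=
  [("a", ["x", "y"]), ("b", ["y"])]
def Spec_get_categories_per_recommendation (recommendations_per_category : List (String × List String)) (out : List (String × List (String × String))) : Prop := out = get_categories_per_recommendation_alt recommendations_per_category
instance (recommendations_per_category : List (String × List String)) (out : List (String × List (String × String))) : Decidable (Spec_get_categories_per_recommendation recommendations_per_category out) := by unfold Spec_get_categories_per_recommendation; infer_instance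

-- ===== CLAIM (what is proved, stated in full; the proofs are below) =====
def Claim_equal_get_categories_per_recommendation : Prop := ∀ (recommendations_per_category : List (String × List String)), Dom_get_categories_per_recommendation recommendations_per_category → Pre_get_categories_per_recommendation recommendations_per_category → Spec_get_categories_per_recommendation recommendations_per_category (get_categories_per_recommendation recommendations_per_category)

-- ===== LEMMAS AND PROOFS =====

-- The flattened (category-key, recommendation) pair sequence both nested loops traverse.
def pvFlat (rpc : List (String × List String)) : List (String × String) :=
  rpc.flatMap (fun c => c.2.map (fun r => (c.1, r)))

-- Category keys attached to recommendation r in a pair history.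
def pvCats (ps : List (String × String)) (r : String) : List String :=
  (ps.filter (fun p => p.2 == r)).map Prod.fst

-- A's row for r after history ps, as an items list.
def pvRowL (rpc : List (String × List String)) (ps : List (String × String)) (r : String) : List (String × String) :=
  rpc.map (fun c => (c.1, if c.1 ∈ pvCats ps r then "+" else " "))

def pvStepA (rpc : List (String × List String)) (d : PySem.Dict String (PySem.Dict String String)) (p : String × String) : PySem.Dict String (PySem.Dict String String) :=
  let d :=
    if d.contains p.2 then d
    else d.insert p.2 (rpc.foldl (fun row c => row.insert c.1 " ") PySem.Dict.empty)
  d.modify p.2 PySem.Dict.empty (fun row => row.insert p.1 "+")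

theorem pvFoldA_eq_flat (rpc xs : List (String × List String)) (d : PySem.Dict String (PySem.Dict String String)) :
    xs.foldl (fun cpr category =>
      category.2.foldl (fun cpr recommendation =>
        let cpr :=
          if cpr.contains recommendation then cpr
          else cpr.insert recommendation
            (rpc.foldl (fun row c => row.insert c.1 " ") PySem.Dict.empty)
        cpr.modify recommendation PySem.Dict.empty (fun row => row.insert category.1 "+")
      ) cpr) d
    = (pvFlat xs).foldl (pvStepA rpc) d := by
  induction xs generalizing d with
  | nil => rfl
  | cons c t ih =>
      simp only [List.foldl_cons, pvFlat, List.flatMap_cons, List.foldl_append, List.foldl_map, ih]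
      rfl

theorem pvFoldB_eq_flat (xs : List (String × List String)) (o : List String) :
    xs.foldl (fun order category =>
      category.2.foldl (fun order r =>
        if order.contains r then order else order ++ [r]) order) o
    = ((pvFlat xs).map Prod.snd).foldl (fun order r =>
        if order.contains r then order else order ++ [r]) o := by
  induction xs generalizing o with
  | nil => rfl
  | cons c t ih =>
      simp only [List.foldl_cons, pvFlat, List.flatMap_cons, List.map_append, List.map_map,
        List.foldl_append, List.foldl_map, ih]
      rfl

theorem pvOrder_eq_ofList (l : List String) :
    l.foldl (fun order r => if order.contains r then order else order ++ [r]) []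
      = PySem.Set.ofList l := by
  rw [PySem.Set.ofList_eq_foldl]
  rfl

theorem pvOfList_append_singleton {α : Type} [BEq α] (l : List α) (x : α) :
    PySem.Set.ofList (l ++ [x]) = PySem.Set.add (PySem.Set.ofList l) x := by
  simp [PySem.Set.ofList, List.foldl_append]

theorem pvAdd_of_mem {α : Type} [BEq α] [LawfulBEq α] (s : PySem.Set α) (x : α) (h : x ∈ s) :
    PySem.Set.add s x = s := by
  simp only [PySem.Set.add, PySem.Set.contains]
  simp [h]

theorem pvAdd_of_not_mem {α : Type} [BEq α] [LawfulBEq α] (s : PySem.Set α) (x : α) (h : x ∉ s) :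
    PySem.Set.add s x = s ++ [x] := by
  simp only [PySem.Set.add, PySem.Set.contains]
  simp [h]

theorem pvCats_append (qs : List (String × String)) (p : String × String) (r : String) :
    pvCats (qs ++ [p]) r = if p.2 = r then pvCats qs r ++ [p.1] else pvCats qs r := by
  simp only [pvCats, List.filter_append, List.map_append]
  by_cases h : p.2 = r <;> simp [h]

theorem pvCats_of_not_mem (qs : List (String × String)) (r : String) (h : r ∉ qs.map Prod.snd) :
    pvCats qs r = [] := by
  simp only [pvCats, List.map_eq_nil_iff, List.filter_eq_nil_iff]
  intro p hp
  simp only [beq_iff_eq]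
  exact fun he => h (he ▸ List.mem_map_of_mem hp)

theorem pvRowL_irrel (rpc : List (String × List String)) (qs : List (String × String))
    (p : String × String) (r : String) (h : ¬ p.2 = r) :
    pvRowL rpc (qs ++ [p]) r = pvRowL rpc qs r := by
  simp [pvRowL, pvCats_append, h]

theorem pvRow0 (rpc : List (String × List String)) (hnd : (rpc.map Prod.fst).Nodup) :
    rpc.foldl (fun row c => row.insert c.1 " ") PySem.Dict.empty
      = PySem.Dict.mk (rpc.map (fun c => (c.1, " "))) := by
  apply PySem.Dict.ext
  rw [PySem.Dict.items_foldl_insert_fresh rpc Prod.fst (fun _ => " ") PySem.Dict.empty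
    (fun a _ => PySem.Dict.contains_empty _) hnd]
  rfl

theorem pvRowL_of_not_mem (rpc : List (String × List String)) (qs : List (String × String))
    (r : String) (h : r ∉ qs.map Prod.snd) :
    PySem.Dict.mk (pvRowL rpc qs r) = PySem.Dict.mk (rpc.map (fun c => (c.1, " "))) := by
  simp [pvRowL, pvCats_of_not_mem qs r h]

theorem pvRowInsert (rpc : List (String × List String)) (qs : List (String × String))
    (a r : String) (ha : a ∈ rpc.map Prod.fst) :
    (PySem.Dict.mk (pvRowL rpc qs r)).insert a "+"
      = PySem.Dict.mk (pvRowL rpc (qs ++ [(a, r)]) r) := by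
  have hkeys : (PySem.Dict.mk (pvRowL rpc qs r)).keys = rpc.map Prod.fst := by
    simp [PySem.Dict.keys, pvRowL, List.map_map]
  have hc : (PySem.Dict.mk (pvRowL rpc qs r)).contains a = true := by
    rw [PySem.Dict.contains_eq_decide_mem_keys, hkeys]
    simp [ha]
  apply PySem.Dict.ext
  rw [PySem.Dict.items_insert_of_contains _ _ hc]
  show (pvRowL rpc qs r).map _ = pvRowL rpc (qs ++ [(a, r)]) r
  simp only [pvRowL, List.map_map, pvCats_append]
  refine List.map_congr_left (fun c hc => ?_)
  by_cases h : c.1 = a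
  · simp [h]
  · simp [h, Function.comp]

theorem pvInvA (rpc : List (String × List String)) (hnd : (rpc.map Prod.fst).Nodup)
    (ps : List (String × String)) (hk : ∀ p ∈ ps, p.1 ∈ rpc.map Prod.fst) :
    ((ps.foldl (pvStepA rpc) PySem.Dict.empty).keys = PySem.Set.ofList (ps.map Prod.snd)) ∧
    (∀ r, (ps.foldl (pvStepA rpc) PySem.Dict.empty).get? r =
      if r ∈ ps.map Prod.snd then some (PySem.Dict.mk (pvRowL rpc ps r)) else none) := by
  induction ps using List.reverseRecOn with
  | nil => exact ⟨rfl, fun r => by simp [PySem.Dict.get?_empty]⟩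
  | append_singleton qs p ih =>
      obtain ⟨ihk, ihg⟩ := ih (fun q hq => hk q (List.mem_append_left _ hq))
      have hp1 : p.1 ∈ rpc.map Prod.fst := hk p (List.mem_append_right _ (by simp))
      set d := qs.foldl (pvStepA rpc) PySem.Dict.empty with hd
      have hstep : (qs ++ [p]).foldl (pvStepA rpc) PySem.Dict.empty = pvStepA rpc d p := by
        rw [List.foldl_append]; rfl
      have hcont : d.contains p.2 = decide (p.2 ∈ qs.map Prod.snd) := by
        rw [PySem.Dict.contains_eq_decide_mem_keys, ihk]
        simp [PySem.Set.mem_ofList]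
      by_cases hmem : p.2 ∈ qs.map Prod.snd
      · have hc : d.contains p.2 = true := by simp [hcont, hmem]
        have hval : d.getD p.2 PySem.Dict.empty = PySem.Dict.mk (pvRowL rpc qs p.2) := by
          rw [PySem.Dict.getD_eq_get?_getD, ihg p.2]; simp [hmem]
        have hmod : pvStepA rpc d p = d.insert p.2 (PySem.Dict.mk (pvRowL rpc (qs ++ [p]) p.2)) := by
          simp only [pvStepA, hc, if_true, PySem.Dict.modify, hval, pvRowInsert rpc qs p.1 p.2 hp1]
        have hofl : PySem.Set.ofList ((qs ++ [p]).map Prod.snd) = PySem.Set.ofList (qs.map Prod.snd) := by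
          rw [List.map_append, List.map_singleton, pvOfList_append_singleton,
            pvAdd_of_mem _ _ ((PySem.Set.mem_ofList _ _).mpr hmem)]
        refine ⟨?_, ?_⟩
        · rw [hstep, hofl, hmod, PySem.Dict.keys_insert_of_contains _ _ hc, ihk]
        · intro r
          rw [hstep, hmod, PySem.Dict.get?_insert]
          by_cases hr : r = p.2
          · subst hr
            simp [hmem, List.map_append]
          · have hr' : ¬ p.2 = r := fun he => hr he.symm
            rw [pvRowL_irrel rpc qs p r hr', ihg r]
            simp only [if_neg hr, List.map_append, List.map_singleton, List.mem_append,
              List.mem_singleton, or_iff_left hr]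
      · have hc : d.contains p.2 = false := by simp [hcont, hmem]
        have hmod : pvStepA rpc d p = d.insert p.2 (PySem.Dict.mk (pvRowL rpc (qs ++ [p]) p.2)) := by
          simp only [pvStepA, hc, if_false, Bool.false_eq_true, PySem.Dict.modify,
            PySem.Dict.getD_insert_self, PySem.Dict.insert_insert_self,
            pvRow0 rpc hnd]
          rw [← pvRowL_of_not_mem rpc qs p.2 hmem, pvRowInsert rpc qs p.1 p.2 hp1]
        have hofl : PySem.Set.ofList ((qs ++ [p]).map Prod.snd)
            = PySem.Set.ofList (qs.map Prod.snd) ++ [p.2] := by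
          rw [List.map_append, List.map_singleton, pvOfList_append_singleton,
            pvAdd_of_not_mem _ _ (fun hx => hmem ((PySem.Set.mem_ofList _ _).mp hx))]
        refine ⟨?_, ?_⟩
        · rw [hstep, hofl, hmod, PySem.Dict.keys_insert_of_not_contains _ _ hc, ihk]
        · intro r
          rw [hstep, hmod, PySem.Dict.get?_insert]
          by_cases hr : r = p.2
          · subst hr
            simp [List.map_append]
          · have hr' : ¬ p.2 = r := fun he => hr he.symm
            rw [pvRowL_irrel rpc qs p r hr', ihg r]
            simp only [if_neg hr, List.map_append, List.map_singleton, List.mem_append,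
              List.mem_singleton, or_iff_left hr]

theorem pvSorted_congr {α : Type} (xs : List α) (k1 k2 : α → Nat) (rev : Bool)
    (h : ∀ x ∈ xs, k1 x = k2 x) :
    PySem.List.sorted xs k1 rev = PySem.List.sorted xs k2 rev := by
  have hins : ∀ (b1 b2 : α → α → Bool) (x : α) (acc : List α),
      (∀ y ∈ acc, b1 x y = b2 x y) → PySem.List.insertBy b1 x acc = PySem.List.insertBy b2 x acc := by
    intro b1 b2 x acc
    induction acc with
    | nil => intro _; rfl
    | cons y ys ih =>
        intro hy
        simp only [PySem.List.insertBy]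
        rw [hy y (by simp)]
        split
        · rfl
        · simp only [List.cons.injEq, true_and]
          exact ih (fun z hz => hy z (by simp [hz]))
  have key : ∀ (b1 b2 : α → α → Bool),
      (∀ x y, k1 x = k2 x → k1 y = k2 y → b1 x y = b2 x y) →
      ∀ (ys acc : List α), (∀ x ∈ ys, k1 x = k2 x) → (∀ y ∈ acc, k1 y = k2 y) →
      ys.foldl (fun acc x => PySem.List.insertBy b1 x acc) acc
      = ys.foldl (fun acc x => PySem.List.insertBy b2 x acc) acc := by
    intro b1 b2 hb ys
    induction ys with
    | nil => intro acc _ _; rfl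
    | cons x t ih =>
        intro acc hys hacc
        simp only [List.foldl_cons]
        rw [hins b1 b2 x acc (fun y hy => hb x y (hys x (by simp)) (hacc y hy))]
        exact ih _ (fun z hz => hys z (by simp [hz])) (fun y hy => by
          rcases (PySem.List.mem_insertBy b2 x y acc).mp hy with h1 | h2
          · exact h1 ▸ hys x (by simp)
          · exact hacc y h2)
  cases rev with
  | false =>
      simp only [PySem.List.sorted]
      exact key _ _ (fun x y hx hy => by simp [hx, hy]) xs [] h (by simp)
  | true =>
      simp only [PySem.List.sorted]
      exact key _ _ (fun x y hx hy => by simp [hx, hy]) xs [] h (by simp)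

theorem pvFlat_keys (rpc : List (String × List String)) :
    ∀ p ∈ pvFlat rpc, p.1 ∈ rpc.map Prod.fst := by
  intro p hp
  simp only [pvFlat, List.mem_flatMap] at hp
  obtain ⟨c, hc, hp⟩ := hp
  obtain ⟨r, _, rfl⟩ := List.mem_map.mp hp
  exact List.mem_map_of_mem hc

-- Under nodup category keys, a key c.1 carries a '+' for r exactly when r occurs in c's list.
theorem pvMemCats (rpc : List (String × List String)) (hnd : (rpc.map Prod.fst).Nodup)
    (c : String × List String) (hc : c ∈ rpc) (r : String) :
    c.1 ∈ pvCats (pvFlat rpc) r ↔ r ∈ c.2 := by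
  constructor
  · intro h
    simp only [pvCats, List.mem_map, List.mem_filter, beq_iff_eq] at h
    obtain ⟨p, ⟨hp, hpr⟩, hp1⟩ := h
    simp only [pvFlat, List.mem_flatMap, List.mem_map] at hp
    obtain ⟨c', hc', r', hr', hpe⟩ := hp
    have h1 : c'.1 = c.1 := by rw [← hp1, ← hpe]
    have : c' = c := List.inj_on_of_nodup_map hnd hc' hc h1
    subst this
    have : r' = r := by rw [← hpr, ← hpe]
    exact this ▸ hr'
  · intro h
    have hp : (c.1, r) ∈ pvFlat rpc := by
      simp only [pvFlat, List.mem_flatMap, List.mem_map]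
      exact ⟨c, hc, r, h, rfl⟩
    simp only [pvCats, List.mem_map, List.mem_filter, beq_iff_eq]
    exact ⟨(c.1, r), ⟨hp, rfl⟩, rfl⟩

-- ===== VERDICT (by name: the statement is the Claim_ definition above) =====
theorem get_categories_per_recommendation_spec : Claim_equal_get_categories_per_recommendation := by
  intro rpc _ hpre
  unfold Spec_get_categories_per_recommendation
  obtain ⟨hKA, hGA⟩ := pvInvA rpc hpre (pvFlat rpc) (pvFlat_keys rpc)
  simp only [get_categories_per_recommendation, get_categories_per_recommendation_alt]
  rw [pvFoldA_eq_flat rpc rpc, pvFoldB_eq_flat rpc, pvOrder_eq_ofList]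
  rw [hKA]
  have hgdA : ∀ r ∈ PySem.Set.ofList ((pvFlat rpc).map Prod.snd),
      (List.foldl (pvStepA rpc) PySem.Dict.empty (pvFlat rpc)).getD r PySem.Dict.empty
        = PySem.Dict.mk (pvRowL rpc (pvFlat rpc) r) := by
    intro r hr
    rw [PySem.Dict.getD_eq_get?_getD, hGA r]
    simp [(PySem.Set.mem_ofList _ _).mp hr]
  have hrowkeys : ∀ r, (PySem.Dict.mk (pvRowL rpc (pvFlat rpc) r)).keys = rpc.map Prod.fst := by
    intro r
    simp [PySem.Dict.keys, pvRowL, List.map_map]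
  have hcell : ∀ r, ∀ c ∈ rpc.map Prod.fst,
      (PySem.Dict.mk (pvRowL rpc (pvFlat rpc) r)).getD c ""
        = if c ∈ pvCats (pvFlat rpc) r then "+" else " " := by
    intro r c hc
    have hmemitem : (c, if c ∈ pvCats (pvFlat rpc) r then "+" else " ")
        ∈ (PySem.Dict.mk (pvRowL rpc (pvFlat rpc) r)).items := by
      obtain ⟨c0, hc0, rfl⟩ := List.mem_map.mp hc
      exact List.mem_map_of_mem hc0
    exact PySem.Dict.getD_of_mem_items _ hmemitem (by rw [hrowkeys r]; exact hpre) ""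
  have hkeyeq : PySem.List.sorted (PySem.Set.ofList ((pvFlat rpc).map Prod.snd))
        (fun r =>
          (List.filter
              (fun c =>
                ((List.foldl (pvStepA rpc) PySem.Dict.empty (pvFlat rpc)).getD r PySem.Dict.empty).getD c "" == "+")
              ((List.foldl (pvStepA rpc) PySem.Dict.empty (pvFlat rpc)).getD r PySem.Dict.empty).keys).length)
        true
      = PySem.List.sorted (PySem.Set.ofList ((pvFlat rpc).map Prod.snd))
        (fun r => rpc.countP (fun c => c.2.contains r)) true := by
    apply pvSorted_congr
    intro r hr
    rw [hgdA r hr, hrowkeys r]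
    rw [List.filter_congr (q := fun c => decide (c ∈ pvCats (pvFlat rpc) r)) (fun c hc => by
      rw [hcell r c hc]
      by_cases h : c ∈ pvCats (pvFlat rpc) r <;> simp [h])]
    rw [← List.countP_eq_length_filter, List.countP_map]
    refine List.countP_congr (fun c hc => ?_)
    have := pvMemCats rpc hpre c hc r
    simp only [Function.comp]
    by_cases h : r ∈ c.2
    · simp [this.mpr h, h]
    · have h2 : c.1 ∉ pvCats (pvFlat rpc) r := fun hx => h (this.mp hx)
      simp [h2, h]
  rw [hkeyeq]
  apply List.map_congr_left
  intro r hr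
  have hrR : r ∈ PySem.Set.ofList ((pvFlat rpc).map Prod.snd) :=
    (PySem.List.sorted_perm _ _ _).mem_iff.mp hr
  rw [hgdA r hrR]
  refine Prod.ext rfl ?_
  show pvRowL rpc (pvFlat rpc) r = _
  refine List.map_congr_left (fun c hc => ?_)
  have := pvMemCats rpc hpre c hc r
  by_cases h : r ∈ c.2
  · simp [this.mpr h, h]
  · have h2 : c.1 ∉ pvCats (pvFlat rpc) r := fun hx => h (this.mp hx)
    simp [h2, h]
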